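-- pv_equiv track=rewrite | github.com/gelaiwang/Gelai_AI-Translate | core/llm_translate.py | _create_sliding_window_chunks
-- ===== SOURCE A (Python) =====
-- def _create_sliding_window_chunks(
--     lines: list[str],
--     window_size: int,
--     overlap: int,
-- ) -> list[tuple[int, int, list[str]]]:
--     """
--     滑动窗口分块，返回 (start_idx, end_idx, chunk_lines) 列表。
--     - window_size: 每个 chunk 的行数
--     - overlap: 重叠行数，步进 = window_size - overlap
--     """
--     if window_size <= 0:
--         window_size = 40
--     if overlap < 0 or overlap >= window_size:
--         overlap = 0
--
--     step = window_size - overlap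
--     chunks = []
--     start = 0
--     total = len(lines)
--
--     while start < total:
--         end = min(start + window_size, total)
--         chunks.append((start, end, lines[start:end]))
--         if end >= total:
--             break
--         start += step
--
--     return chunks
-- ===== SOURCE B (Python) =====
-- def _create_sliding_window_chunks(
--     lines: list[str],
--     window_size: int,
--     overlap: int,
-- ) -> list[tuple[int, int, list[str]]]:
--     if window_size <= 0:
--         window_size = 40
--     if overlap < 0 or overlap >= window_size:
--         overlap = 0
--     step = window_size - overlap
--     total = len(lines)
--     m = 0 if total == 0 else 1 + max(0, -(-(total - window_size) // step))
--     return [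
--         (i * step, min(i * step + window_size, total), lines[i * step:min(i * step + window_size, total)])
--         for i in range(m)
--     ]
-- ===== Notes on version B (the rewrite author's own statement) =====
-- stated objective: alternative
-- what changed: Replaced the incremental while-loop with break by a count-then-map decomposition: the number of chunks is computed in closed form via ceiling division and the result is built by a single comprehension over range(m).
import Mathlib
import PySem

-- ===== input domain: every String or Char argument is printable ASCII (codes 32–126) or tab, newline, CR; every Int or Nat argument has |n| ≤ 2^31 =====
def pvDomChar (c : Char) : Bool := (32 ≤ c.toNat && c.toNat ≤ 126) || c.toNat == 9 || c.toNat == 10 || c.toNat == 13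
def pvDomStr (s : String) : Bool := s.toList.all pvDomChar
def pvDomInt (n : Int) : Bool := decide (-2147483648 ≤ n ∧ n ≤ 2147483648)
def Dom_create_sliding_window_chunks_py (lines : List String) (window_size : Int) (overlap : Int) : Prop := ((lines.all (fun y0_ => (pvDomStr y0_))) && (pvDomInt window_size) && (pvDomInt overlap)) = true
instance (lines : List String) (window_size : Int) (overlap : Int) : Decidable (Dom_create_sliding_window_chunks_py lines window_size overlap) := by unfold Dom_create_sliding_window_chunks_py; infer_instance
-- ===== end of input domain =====

-- B replaces A's while-loop-with-break accumulator by a closed-form chunk count plus one map; same cost, different decomposition.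

-- ===== PORT A =====
-- the while loop; fuel bounds the iterations (step ≥ 1 after the guards, so lines.length + 1 always suffices)
def pvALoop (fuel : Nat) (lines : List String) (window_size step start : Int) :
    List (Int × Int × List String) :=
  match fuel with
  | 0 => []
  | fuel + 1 =>
    let total : Int := lines.length
    if start < total then
      let e := min (start + window_size) total
      (start, e, PySem.List.slice lines (some start) (some e)) ::
        (if e ≥ total then [] else pvALoop fuel lines window_size step (start + step))
    else []

def create_sliding_window_chunks_py (lines : List String) (window_size : Int) (overlap : Int) : List (Int × Int × List String) :=
  let window_size := if window_size ≤ 0 then 40 else window_size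
  let overlap := if overlap < 0 ∨ overlap ≥ window_size then 0 else overlap
  let step := window_size - overlap
  pvALoop (lines.length + 1) lines window_size step 0

-- ===== PORT B =====
def create_sliding_window_chunks_py_alt (lines : List String) (window_size : Int) (overlap : Int) : List (Int × Int × List String) :=
  let window_size := if window_size ≤ 0 then 40 else window_size
  let overlap := if overlap < 0 ∨ overlap ≥ window_size then 0 else overlap
  let step := window_size - overlap
  let total : Int := lines.length
  let m : Int := if total = 0 then 0 else
    1 + max 0 (-(PySem.Int.floordiv (-(total - window_size)) step))
  (PySem.List.pyRange 0 m 1).map (fun i =>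
    (i * step, min (i * step + window_size) total,
      PySem.List.slice lines (some (i * step)) (some (min (i * step + window_size) total))))

-- ===== PRECONDITION & SPEC =====
def Spec_create_sliding_window_chunks_py (lines : List String) (window_size : Int) (overlap : Int) (out : List (Int × Int × List String)) : Prop := out = create_sliding_window_chunks_py_alt lines window_size overlap
instance (lines : List String) (window_size : Int) (overlap : Int) (out : List (Int × Int × List String)) : Decidable (Spec_create_sliding_window_chunks_py lines window_size overlap out) := by unfold Spec_create_sliding_window_chunks_py; infer_instance

-- ===== CLAIM (what is proved, stated in full; the proofs are below) =====
def Claim_equal_create_sliding_window_chunks_py : Prop := ∀ (lines : List String) (window_size : Int) (overlap : Int), Dom_create_sliding_window_chunks_py lines window_size overlap → Spec_create_sliding_window_chunks_py lines window_size overlap (create_sliding_window_chunks_py lines window_size overlap)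

-- ===== LEMMAS AND PROOFS =====

-- ceiling division q = -((-x) // s) for s > 0: its defining bounds, and the shift-by-s identity
theorem pvCeilBounds (x s : Int) (hs : 0 < s) :
    (-(PySem.Int.floordiv (-x) s) - 1) * s < x ∧ x ≤ -(PySem.Int.floordiv (-x) s) * s :=
  (PySem.Int.neg_floordiv_neg_eq_iff_of_pos hs).mp rfl

theorem pvCeil_sub (x s : Int) (hs : 0 < s) :
    -(PySem.Int.floordiv (-(x - s)) s) = -(PySem.Int.floordiv (-x) s) - 1 := by
  obtain ⟨h1, h2⟩ := pvCeilBounds x s hs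
  exact (PySem.Int.neg_floordiv_neg_eq_iff_of_pos hs).mpr ⟨by nlinarith, by nlinarith⟩

theorem pvCeil_nonpos (x s : Int) (hs : 0 < s) (hx : x ≤ 0) :
    -(PySem.Int.floordiv (-x) s) ≤ 0 := by
  obtain ⟨h1, h2⟩ := pvCeilBounds x s hs
  nlinarith

theorem pvCeil_pos (x s : Int) (hs : 0 < s) (hx : 0 < x) :
    1 ≤ -(PySem.Int.floordiv (-x) s) := by
  obtain ⟨h1, h2⟩ := pvCeilBounds x s hs
  nlinarith

-- chunk count the loop emits from position start, in closed form
def pvCnt (total w step start : Int) : Int :=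
  if start < total then 1 + max 0 (-(PySem.Int.floordiv (-(total - start - w)) step)) else 0

theorem pvLoop_eq_map (lines : List String) (w step : Int)
    (hs : 1 ≤ step) (hsw : step ≤ w) :
    ∀ (fuel : Nat) (start : Int),
      (lines.length : Int) - start < fuel →
      pvALoop fuel lines w step start =
        (List.range (pvCnt lines.length w step start).toNat).map
          (fun (j : Nat) => ((start + (j : Int) * step : Int), min (start + (j : Int) * step + w) (lines.length : Int),
            PySem.List.slice lines (some (start + (j : Int) * step))
              (some (min (start + (j : Int) * step + w) (lines.length : Int))))) := by
  intro fuel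
  induction fuel with
  | zero =>
    intro start hfuel
    have hge : ¬ start < (lines.length : Int) := by push_cast at hfuel ⊢; omega
    rw [pvALoop]
    rw [pvCnt, if_neg hge]
    simp
  | succ fuel ih =>
    intro start hfuel
    by_cases hlt : start < (lines.length : Int)
    · by_cases hend : (lines.length : Int) ≤ start + w
      · -- last chunk: end reaches total, loop breaks; count is 1
        have hq : -(PySem.Int.floordiv (-((lines.length : Int) - start - w)) step) ≤ 0 :=
          pvCeil_nonpos _ _ (by omega) (by omega)
        have hcnt : pvCnt lines.length w step start = 1 := by
          rw [pvCnt, if_pos hlt]; omega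
        have he : (lines.length : Int) ≤ min (start + w) (lines.length : Int) := by omega
        rw [pvALoop]
        simp only [if_pos hlt, if_pos he, hcnt]
        norm_num
      · -- loop continues with start + step
        push Not at hend
        have hx : 0 < (lines.length : Int) - start - w := by omega
        have hq1 : 1 ≤ -(PySem.Int.floordiv (-((lines.length : Int) - start - w)) step) :=
          pvCeil_pos _ _ (by omega) hx
        have hlt' : start + step < (lines.length : Int) := by omega
        have hshift : -(PySem.Int.floordiv (-((lines.length : Int) - (start + step) - w)) step)
            = -(PySem.Int.floordiv (-((lines.length : Int) - start - w)) step) - 1 := by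
          have h := pvCeil_sub ((lines.length : Int) - start - w) step (by omega)
          rw [show (lines.length : Int) - (start + step) - w
                = ((lines.length : Int) - start - w) - step by ring, h]
        have hcnt : (pvCnt lines.length w step start).toNat
            = (pvCnt lines.length w step (start + step)).toNat + 1 := by
          rw [pvCnt, pvCnt, if_pos hlt, if_pos hlt', hshift]; omega
        have hrec := ih (start + step) (by omega)
        have hne : ¬ ((lines.length : Int) ≤ min (start + w) (lines.length : Int)) := by
          rw [min_eq_left (by omega : start + w ≤ (lines.length : Int))]; omega
        rw [pvALoop]
        simp only [if_pos hlt, if_neg hne, hrec, hcnt, List.range_succ_eq_map,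
          List.map_cons, List.map_map]
        congr 1
        · have : min (start + w) (lines.length : Int) = start + w := min_eq_left (le_of_lt hend)
          norm_num [this]
        · apply List.map_congr_left
          intro j _
          simp only [Function.comp_apply, Nat.succ_eq_add_one]
          push_cast
          have h : start + ((j : Int) + 1) * step = start + step + (j : Int) * step := by ring
          rw [h]
    · have hcnt : pvCnt lines.length w step start = 0 := by rw [pvCnt, if_neg hlt]
      rw [pvALoop]
      simp only [if_neg hlt, hcnt]
      simp

-- ===== VERDICT (by name: the statement is the Claim_ definition above) =====
theorem create_sliding_window_chunks_py_spec : Claim_equal_create_sliding_window_chunks_py := by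
  intro lines window_size overlap _
  unfold Spec_create_sliding_window_chunks_py
  simp only [create_sliding_window_chunks_py, create_sliding_window_chunks_py_alt]
  set W : Int := if window_size ≤ 0 then 40 else window_size with hW
  set OV : Int := if overlap < 0 ∨ overlap ≥ W then 0 else overlap with hOV
  have hW1 : 1 ≤ W := by rw [hW]; split <;> omega
  have hOVb : 0 ≤ OV ∧ OV < W := by
    rw [hOV]; split
    · omega
    · rename_i h; push Not at h; exact ⟨h.1, h.2⟩
  have hs : 1 ≤ W - OV := by omega
  have hsw : W - OV ≤ W := by omega
  rw [pvLoop_eq_map lines W (W - OV) hs hsw (lines.length + 1) 0 (by push_cast; omega)]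
  rw [PySem.List.pyRange_one, List.map_map]
  have hm : (if (lines.length : Int) = 0 then 0 else
      1 + max 0 (-PySem.Int.floordiv (-((lines.length : Int) - W)) (W - OV)))
      = pvCnt lines.length W (W - OV) 0 := by
    rw [pvCnt]
    rcases Nat.eq_zero_or_pos lines.length with h0 | h0
    · simp [h0]
    · have hpos : (0:Int) < lines.length := by exact_mod_cast h0
      rw [if_neg (by omega), if_pos hpos, sub_zero]
  rw [hm, sub_zero]
  apply List.map_congr_left
  intro k _
  simp
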